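-- pv_equiv track=rewrite | github.com/CrawfordPat/Algorithm-Practice | 21-card-simulator/cardSim.py | makeColumns
-- ===== SOURCE A (Python) =====
-- def makeColumns(deck):
--     col1 = []
--     col2 = []
--     col3 = []
--
--     for i in range(0, len(deck)):
--         if i % 3 == 0:
--             col1.append(deck[i])
--         elif i % 3 == 1:
--             col2.append(deck[i])
--         elif i % 3 == 2:
--             col3.append(deck[i])
--
--     return col1, col2, col3
-- ===== SOURCE B (Python) =====
-- def makeColumns(deck):
--     # Three independent strided slices; list() keeps list-of-elements semantics
--     # for any sequence input (tuple, string), matching the original's appends.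
--     return list(deck[0::3]), list(deck[1::3]), list(deck[2::3])
-- ===== Notes on version B (the rewrite author's own statement) =====
-- stated objective: idiomatic
-- what changed: Drops the index loop with i % 3 branching entirely: the three columns are computed directly as the strided slices deck[0::3], deck[1::3], deck[2::3] (three independent strided passes, no loop, no branch).
import Mathlib
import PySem

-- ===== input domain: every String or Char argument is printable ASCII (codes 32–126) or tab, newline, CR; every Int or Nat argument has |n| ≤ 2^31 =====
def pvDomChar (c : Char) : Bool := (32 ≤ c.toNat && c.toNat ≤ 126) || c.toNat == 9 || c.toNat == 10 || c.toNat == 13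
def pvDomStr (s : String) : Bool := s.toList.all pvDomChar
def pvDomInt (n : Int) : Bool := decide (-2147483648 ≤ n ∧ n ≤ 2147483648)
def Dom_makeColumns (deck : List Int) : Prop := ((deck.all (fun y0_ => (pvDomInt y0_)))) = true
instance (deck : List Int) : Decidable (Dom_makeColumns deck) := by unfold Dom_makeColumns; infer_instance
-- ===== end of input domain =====

-- B computes the three columns directly as the strided slices deck[0::3], deck[1::3], deck[2::3]
-- (no loop, no branching) instead of A's index loop with i % 3 dispatch; objective: idiomatic.

-- ===== PORT A =====
def makeColumns (deck : List Int) : List Int × List Int × List Int :=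
  (PySem.List.pyRange 0 (PySem.List.len deck) 1).foldl
    (fun cols i =>
      if PySem.Int.mod i 3 = 0 then (cols.1 ++ [PySem.List.pyGetD deck i 0], cols.2.1, cols.2.2)
      else if PySem.Int.mod i 3 = 1 then (cols.1, cols.2.1 ++ [PySem.List.pyGetD deck i 0], cols.2.2)
      else if PySem.Int.mod i 3 = 2 then (cols.1, cols.2.1, cols.2.2 ++ [PySem.List.pyGetD deck i 0])
      else cols)
    ([], [], [])

-- ===== PORT B =====
-- the step is the literal 3 ≠ 0, so slice? always returns some; getD [] only unwraps it
def makeColumns_alt (deck : List Int) : List Int × List Int × List Int :=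
  ((PySem.List.slice? deck (some 0) none 3).getD [],
   (PySem.List.slice? deck (some 1) none 3).getD [],
   (PySem.List.slice? deck (some 2) none 3).getD [])

-- ===== PRECONDITION & SPEC =====
def Spec_makeColumns (deck : List Int) (out : List Int × List Int × List Int) : Prop := out = makeColumns_alt deck
instance (deck : List Int) (out : List Int × List Int × List Int) : Decidable (Spec_makeColumns deck out) := by unfold Spec_makeColumns; infer_instance

-- ===== CLAIM (what is proved, stated in full; the proofs are below) =====
def Claim_equal_makeColumns : Prop := ∀ (deck : List Int), Dom_makeColumns deck → Spec_makeColumns deck (makeColumns deck)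

-- ===== LEMMAS AND PROOFS =====

/-- Elements of `deck` at positions ≡ r (mod 3), structurally. -/
def pick : Nat → List Int → List Int
  | _, [] => []
  | 0, x :: t => x :: pick 2 t
  | r + 1, _ :: t => pick r t

@[simp] theorem pick_nil (r : Nat) : pick r [] = [] := by cases r <;> rfl

/-- The index-based strided read equals the structural `pick`. -/
theorem filterMap_range_pick (xs : List Int) : ∀ r : Nat,
    List.filterMap (fun k : Nat => xs[(r + 3*k)]?) (List.range ((xs.length - r + 2)/3)) = pick r xs := by
  induction xs with
  | nil => intro r; simp
  | cons x t ih =>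
    intro r
    match r with
    | 0 =>
      have hc : ((x::t).length - 0 + 2)/3 = (t.length - 2 + 2)/3 + 1 := by
        simp only [List.length_cons]; omega
      rw [hc, List.range_succ_eq_map, List.filterMap_cons, List.filterMap_map]
      have h0 : (x::t)[(0 + 3*0 : Nat)]? = some x := rfl
      rw [h0]
      have key : List.filterMap ((fun k : Nat => (x::t)[(0 + 3*k)]?) ∘ Nat.succ)
          (List.range ((t.length - 2 + 2)/3)) = pick 2 t := by
        rw [List.filterMap_congr (g := fun k : Nat => t[(2 + 3*k)]?) ?_, ih 2]
        intro k _
        show (x::t)[(0 + 3*(k+1))]? = t[(2 + 3*k)]?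
        rw [show 0 + 3*(k+1) = (2 + 3*k) + 1 from by omega, List.getElem?_cons_succ]
      rw [key]
      rfl
    | s + 1 =>
      have hc : ((x::t).length - (s+1) + 2)/3 = (t.length - s + 2)/3 := by
        simp only [List.length_cons]; omega
      rw [hc]
      have : List.filterMap (fun k : Nat => (x::t)[((s+1) + 3*k)]?) (List.range ((t.length - s + 2)/3))
          = List.filterMap (fun k : Nat => t[(s + 3*k)]?) (List.range ((t.length - s + 2)/3)) := by
        apply List.filterMap_congr; intro k _
        have h : (s+1) + 3*k = (s + 3*k) + 1 := by omega
        rw [h, List.getElem?_cons_succ]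
      rw [this, ih s]
      rfl

/-- xs[r::3] as a slice equals the structural `pick`, for a start inside the list. -/
theorem slice3_pick (xs : List Int) (r : Nat) (hn : r ≤ xs.length) :
    PySem.List.slice? xs (some (r : Int)) none 3 = some (pick r xs) := by
  unfold PySem.List.slice? PySem.List.sliceIndices
  have h30 : ¬ ((3:Int) = 0) := by norm_num
  have h3n : ¬ ((3:Int) < 0) := by norm_num
  simp only [if_neg h30, if_neg h3n, if_pos (show (0:Int) < 3 by norm_num)]
  have hrneg : ¬ ((r:Int) < 0) := by omega
  simp only [if_neg hrneg]
  have hmin : min (r:Int) (xs.length:Int) = (r:Int) := by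
    apply min_eq_left; exact_mod_cast hn
  rw [hmin]
  congr 1
  have hcount : (if (r:Int) < (xs.length:Int) then (((xs.length:Int) - r + 3 - 1) / 3).toNat else 0)
      = (xs.length - r + 2)/3 := by
    by_cases h : (r:Int) < (xs.length:Int)
    · rw [if_pos h]; omega
    · rw [if_neg h]; omega
  rw [hcount]
  have hf : (fun k : Nat => xs[((r:Int) + 3 * (k:Int)).toNat]?) = fun k : Nat => xs[(r + 3*k)]? := by
    funext k
    rw [show ((r:Int) + 3 * (k:Int)).toNat = r + 3*k from by omega]
  rw [hf, filterMap_range_pick]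

theorem B_char (deck : List Int) :
    makeColumns_alt deck = (pick 0 deck, pick 1 deck, pick 2 deck) := by
  unfold makeColumns_alt
  match deck with
  | [] => rfl
  | [a] =>
    have h0 := slice3_pick [a] 0 (by simp)
    norm_num at h0
    rw [h0]
    rfl
  | a :: b :: t =>
    have h0 := slice3_pick (a::b::t) 0 (by simp)
    have h1 := slice3_pick (a::b::t) 1 (by simp)
    have h2 := slice3_pick (a::b::t) 2 (by simp)
    norm_num at h0 h1 h2
    rw [h0, h1, h2]
    rfl

/-- A's loop body, on an (index, element) pair. -/
def stepA (cols : List Int × List Int × List Int) (p : Int × Int) :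
    List Int × List Int × List Int :=
  if PySem.Int.mod p.1 3 = 0 then (cols.1 ++ [p.2], cols.2.1, cols.2.2)
  else if PySem.Int.mod p.1 3 = 1 then (cols.1, cols.2.1 ++ [p.2], cols.2.2)
  else if PySem.Int.mod p.1 3 = 2 then (cols.1, cols.2.1, cols.2.2 ++ [p.2])
  else cols

/-- A's loop invariant over `enumerate` with an arbitrary nonnegative start. -/
theorem A_loop (deck : List Int) :
    ∀ (s : Int), 0 ≤ s → ∀ c1 c2 c3 : List Int,
      (PySem.List.enumerate deck s).foldl stepA (c1, c2, c3)
        = (c1 ++ pick (((0 - s) % 3).toNat) deck,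
           c2 ++ pick (((1 - s) % 3).toNat) deck,
           c3 ++ pick (((2 - s) % 3).toNat) deck) := by
  induction deck with
  | nil => simp [PySem.List.enumerate]
  | cons x t ih =>
    intro s hs c1 c2 c3
    rw [PySem.List.enumerate_cons]
    simp only [List.foldl_cons]
    have h3 : s % 3 = 0 ∨ s % 3 = 1 ∨ s % 3 = 2 := by omega
    rcases h3 with h | h | h
    · have hstep : stepA (c1, c2, c3) (s, x) = (c1 ++ [x], c2, c3) := by
        simp [stepA, h]
      rw [hstep, ih (s + 1) (by omega) _ _ _]
      rw [show ((0 - s) % 3).toNat = 0 by omega,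
          show ((1 - s) % 3).toNat = 1 by omega,
          show ((2 - s) % 3).toNat = 2 by omega,
          show ((0 - (s + 1)) % 3).toNat = 2 by omega,
          show ((1 - (s + 1)) % 3).toNat = 0 by omega,
          show ((2 - (s + 1)) % 3).toNat = 1 by omega]
      simp [pick]
    · have hstep : stepA (c1, c2, c3) (s, x) = (c1, c2 ++ [x], c3) := by
        simp [stepA, h]
      rw [hstep, ih (s + 1) (by omega) _ _ _]
      rw [show ((0 - s) % 3).toNat = 2 by omega,
          show ((1 - s) % 3).toNat = 0 by omega,
          show ((2 - s) % 3).toNat = 1 by omega,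
          show ((0 - (s + 1)) % 3).toNat = 1 by omega,
          show ((1 - (s + 1)) % 3).toNat = 2 by omega,
          show ((2 - (s + 1)) % 3).toNat = 0 by omega]
      simp [pick]
    · have hstep : stepA (c1, c2, c3) (s, x) = (c1, c2, c3 ++ [x]) := by
        simp [stepA, h]
      rw [hstep, ih (s + 1) (by omega) _ _ _]
      rw [show ((0 - s) % 3).toNat = 1 by omega,
          show ((1 - s) % 3).toNat = 2 by omega,
          show ((2 - s) % 3).toNat = 0 by omega,
          show ((0 - (s + 1)) % 3).toNat = 0 by omega,
          show ((1 - (s + 1)) % 3).toNat = 1 by omega,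
          show ((2 - (s + 1)) % 3).toNat = 2 by omega]
      simp [pick]

theorem A_char (deck : List Int) :
    makeColumns deck = (pick 0 deck, pick 1 deck, pick 2 deck) := by
  unfold makeColumns
  have hmap := PySem.List.enumerate_eq_map_pyRange deck 0
  have : (PySem.List.pyRange 0 (PySem.List.len deck) 1).foldl
      (fun cols i =>
        if PySem.Int.mod i 3 = 0 then (cols.1 ++ [PySem.List.pyGetD deck i 0], cols.2.1, cols.2.2)
        else if PySem.Int.mod i 3 = 1 then (cols.1, cols.2.1 ++ [PySem.List.pyGetD deck i 0], cols.2.2)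
        else if PySem.Int.mod i 3 = 2 then (cols.1, cols.2.1, cols.2.2 ++ [PySem.List.pyGetD deck i 0])
        else cols) ([], [], [])
      = (PySem.List.enumerate deck 0).foldl stepA ([], [], []) := by
    rw [hmap, List.foldl_map]
    rfl
  rw [this, A_loop deck 0 (by omega) [] [] []]
  norm_num
  rfl

-- ===== VERDICT (by name: the statement is the Claim_ definition above) =====
theorem makeColumns_spec : Claim_equal_makeColumns := by
  intro deck _
  unfold Spec_makeColumns
  rw [A_char, B_char]
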